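-- pv_equiv track=rewrite | github.com/mauercho/for_codingtest | Python3/프로그래머스/4/42891. 무지의 먹방 라이브/무지의 먹방 라이브.py | solution
-- ===== SOURCE A (Python) =====
-- from heapq import heappush, heappop
--
-- def solution(food_times, k):
--     if sum(food_times) <= k:
--         return -1
--     heap = []
--     n = len(food_times)
--     previous = 0
--     least_num = 0
--     for i, food in enumerate(food_times):
--         heappush(heap, (food, i + 1))
--     while heap:
--         diff = (heap[0][0] - previous) * n
--         if k >= diff:
--             k -= diff
--             previous = heappop(heap)[0]
--             n -= 1
--         else:
--             heap.sort(key=lambda x: x[1])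
--             return heap[k % n][1]
--
--     return -1
-- ===== SOURCE B (Python) =====
-- def solution(food_times, k):
--     if not food_times or sum(food_times) <= k:
--         return -1
--
--     def eaten(v):
--         # total seconds consumed once every plate has been eaten down to level v
--         return sum(min(f, v) for f in food_times)
--
--     # binary search for the largest level v with eaten(v) <= k
--     lo = min([0, k] + food_times) - 1     # eaten(lo) <= k
--     hi = max(food_times)                  # eaten(hi) = total > k
--     while hi - lo > 1:
--         mid = (lo + hi) // 2
--         if eaten(mid) <= k:
--             lo = mid
--         else:
--             hi = mid
--     r = k - eaten(lo)
--     # the answer is the (r+1)-th plate, in original order, still above level lo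
--     for i, f in enumerate(food_times):
--         if f > lo:
--             if r == 0:
--                 return i + 1
--             r -= 1
--     return -1
-- ===== Notes on version B (the rewrite author's own statement) =====
-- stated objective: alternative
-- what changed: A's heap simulation (pop plates in sorted order, subtract level blocks, re-sort the survivors by index) is replaced by a binary search on the level v for the largest v with sum(min(f,v)) <= k, followed by one scan of the plates in original order picking the (k - eaten(v))-th plate still above v; no heap and no sorting anywhere.
import Mathlib
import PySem

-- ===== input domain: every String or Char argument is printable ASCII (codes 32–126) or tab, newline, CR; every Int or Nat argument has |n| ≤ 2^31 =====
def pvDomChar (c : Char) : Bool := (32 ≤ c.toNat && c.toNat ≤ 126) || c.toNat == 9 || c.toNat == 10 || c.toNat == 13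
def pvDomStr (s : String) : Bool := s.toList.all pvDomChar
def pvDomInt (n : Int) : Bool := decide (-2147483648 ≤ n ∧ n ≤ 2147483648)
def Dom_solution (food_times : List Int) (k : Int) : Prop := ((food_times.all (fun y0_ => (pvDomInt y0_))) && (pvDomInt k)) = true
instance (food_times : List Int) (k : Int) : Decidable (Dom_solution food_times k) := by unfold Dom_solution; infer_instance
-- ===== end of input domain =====

-- B replaces A's heap simulation by a binary search on the eaten level v (largest v with
-- sum(min(f,v)) <= k) plus one scan in original plate order: a different algorithm, no heap, no sort.

-- ===== PORT A =====
-- Python's tuple comparison '(f1,i1) < (f2,i2)' used by heapq (all pairs here are distinct,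
-- since plate indices are distinct, so heapq's pop order is exactly this strict order).
def pairLt (a b : Int × Int) : Bool := decide (a.1 < b.1) || (!decide (b.1 < a.1) && decide (a.2 < b.2))

-- heap[0] after the pushes: the least pair of the heap's contents (exact: pairs are distinct)
def popMin (x : Int × Int) (xs : List (Int × Int)) : Int × Int :=
  xs.foldl (fun m y => if pairLt y m then y else m) x

-- the 'while heap:' loop; the heap is modelled by its contents (heap[0]/heappop read/remove the
-- least pair, heap.sort(key=...) sorts the contents — exact since all pairs are distinct);
-- fuel = length of the heap, so the fuel-0-on-nonempty branch is never reached.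
def goA : Nat → List (Int × Int) → Int → Int → Int → Int
  | _, [], _, _, _ => -1
  | 0, _ :: _, _, _, _ => -1
  | fuel+1, x :: xs, n, prev, k =>
      let m := popMin x xs
      let diff := (m.1 - prev) * n
      if diff ≤ k then
        goA fuel ((x :: xs).erase m) (n - 1) m.1 (k - diff)
      else
        -- heap.sort(key=lambda x: x[1]); return heap[k % n][1]  (n = heap length > 0 here, so
        -- the index k % n is in range and the 'none' default is unreachable)
        match PySem.List.pyGet? (PySem.List.sorted (x :: xs) (fun p => p.2) false) (PySem.Int.mod k n) with
        | some p => p.2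
        | none => -1

def solution (food_times : List Int) (k : Int) : Int :=
  if food_times.sum ≤ k then -1
  else
    let heap := (PySem.List.enumerate food_times).map (fun p => (p.2, p.1 + 1))
    goA heap.length heap (PySem.List.len food_times) 0 k

-- ===== PORT B =====
-- eaten(v) = sum(min(f, v) for f in food_times)
def eatenP (food_times : List Int) (v : Int) : Int := (food_times.map (fun f => min f v)).sum

-- the 'while hi - lo > 1:' binary-search loop; fuel = initial (hi - lo).toNat is enough,
-- the gap shrinks by at least 1 per iteration, so the fuel-0 arm is never reached.
def bsLoop (food_times : List Int) (k : Int) : Nat → Int → Int → Int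
  | 0, lo, _ => lo
  | fuel+1, lo, hi =>
      if 1 < hi - lo then
        let mid := PySem.Int.floordiv (lo + hi) 2
        if eatenP food_times mid ≤ k then bsLoop food_times k fuel mid hi
        else bsLoop food_times k fuel lo mid
      else lo

-- the final 'for i, f in enumerate(food_times):' scan with the countdown r
def findSurv (v : Int) : List (Int × Int) → Int → Int
  | [], _ => -1
  | (i, f) :: rest, r =>
      if v < f then (if r = 0 then i + 1 else findSurv v rest (r - 1))
      else findSurv v rest r

def solution_alt (food_times : List Int) (k : Int) : Int :=
  if food_times.isEmpty || decide (food_times.sum ≤ k) then -1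
  else
    -- lo = min([0, k] + food_times) - 1; hi = max(food_times)  (both lists nonempty: the
    -- 'none' defaults are unreachable)
    let lo := (match PySem.List.min? (0 :: k :: food_times) (fun x => x) with
               | some m => m | none => 0) - 1
    let hi := (match PySem.List.max? food_times (fun x => x) with
               | some m => m | none => 0)
    let v := bsLoop food_times k (hi - lo).toNat lo hi
    findSurv v (PySem.List.enumerate food_times) (k - eatenP food_times v)

-- ===== PRECONDITION & SPEC =====
def Spec_solution (food_times : List Int) (k : Int) (out : Int) : Prop := out = solution_alt food_times k
instance (food_times : List Int) (k : Int) (out : Int) : Decidable (Spec_solution food_times k out) := by unfold Spec_solution; infer_instance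

-- ===== CLAIM (what is proved, stated in full; the proofs are below) =====
def Claim_equal_solution : Prop := ∀ (food_times : List Int) (k : Int), Dom_solution food_times k → Spec_solution food_times k (solution food_times k)

-- ===== LEMMAS AND PROOFS =====

-- A's loop on the sorted pair list (proof-side model of goA, see go_eq below): consume the
-- lex-sorted pairs front-to-back exactly as goA pops them.
def goSorted : List (Int × Int) → Int → Int → Int → Int
  | [], _, _, _ => -1
  | (food, orig) :: rest, n, prev, k =>
      let diff := (food - prev) * n
      if k < diff then
        match PySem.List.pyGet? (PySem.List.sorted ((food, orig) :: rest) (fun p => p.2) false) (PySem.Int.mod k n) with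
        | some p => p.2
        | none => -1
      else
        goSorted rest (n - 1) food (k - diff)

-- the strict lexicographic order as a proposition
def lexlt (a b : Int × Int) : Prop := a.1 < b.1 ∨ (a.1 = b.1 ∧ a.2 < b.2)

theorem pairLt_iff (a b : Int × Int) : pairLt a b = true ↔ lexlt a b := by
  simp [pairLt, lexlt]; omega

theorem lexlt_asymm {a b : Int × Int} (h1 : lexlt a b) (h2 : lexlt b a) : False := by
  simp [lexlt] at *; omega

theorem not_lexlt_trans {a b c : Int × Int} (h1 : ¬ lexlt b a) (h2 : ¬ lexlt c b) : ¬ lexlt c a := by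
  simp [lexlt] at *; omega

theorem lexlt_of_not_of_ne {a b : Int × Int} (h1 : ¬ lexlt b a) (h2 : a.2 ≠ b.2) : lexlt a b := by
  simp [lexlt] at *; omega

theorem popMin_spec (x : Int × Int) (xs : List (Int × Int)) :
    popMin x xs ∈ x :: xs ∧ ∀ y ∈ x :: xs, ¬ lexlt y (popMin x xs) := by
  induction xs generalizing x with
  | nil => simp [popMin, lexlt]
  | cons y ys ih =>
    have hstep : popMin x (y :: ys) = popMin (if pairLt y x then y else x) ys := rfl
    rcases ih (if pairLt y x then y else x) with ⟨hmem, hmin⟩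
    have hhead := hmin _ (List.mem_cons_self ..)
    have hx : ¬ lexlt x (popMin (if pairLt y x then y else x) ys) := by
      by_cases hp : pairLt y x = true
      · rw [if_pos hp] at hhead ⊢
        exact not_lexlt_trans hhead (fun h => lexlt_asymm ((pairLt_iff _ _).1 hp) h)
      · rw [if_neg hp] at hhead ⊢; exact hhead
    have hy : ¬ lexlt y (popMin (if pairLt y x then y else x) ys) := by
      by_cases hp : pairLt y x = true
      · rw [if_pos hp] at hhead ⊢; exact hhead
      · rw [if_neg hp] at hhead ⊢
        exact not_lexlt_trans hhead (fun h => hp ((pairLt_iff _ _).2 h))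
    refine ⟨?_, ?_⟩
    · rw [hstep]
      by_cases hp : pairLt y x = true
      · rw [if_pos hp] at hmem ⊢
        exact List.mem_cons_of_mem _ hmem
      · rw [if_neg hp] at hmem ⊢
        rcases List.mem_cons.1 hmem with h | h
        · simp [h]
        · simp [h]
    · intro z hz
      rw [hstep]
      rcases List.mem_cons.1 hz with rfl | hz'
      · exact hx
      · rcases List.mem_cons.1 hz' with rfl | hz''
        · exact hy
        · exact hmin z (List.mem_cons_of_mem _ hz'')

-- sorted2 with fst/snd keys is foldl insertBy with pairLt (definitional)
theorem sorted2_eq_foldl (xs : List (Int × Int)) :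
    PySem.List.sorted2 xs (fun p => p.1) (fun p => p.2) false
      = xs.foldl (fun acc x => PySem.List.insertBy pairLt x acc) [] := rfl

theorem insertBy_perm (x : Int × Int) (ys : List (Int × Int)) :
    (PySem.List.insertBy pairLt x ys).Perm (x :: ys) := by
  induction ys with
  | nil => simp [PySem.List.insertBy]
  | cons y ys ih =>
    by_cases h : pairLt x y = true
    · simp [PySem.List.insertBy, h]
    · simp only [PySem.List.insertBy, h]
      simp only [Bool.false_eq_true, if_false]
      exact (ih.cons y).trans (List.Perm.swap x y ys)

theorem foldl_insert_perm (xs acc : List (Int × Int)) :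
    (xs.foldl (fun acc x => PySem.List.insertBy pairLt x acc) acc).Perm (acc ++ xs) := by
  induction xs generalizing acc with
  | nil => simp
  | cons x xs ih =>
    have h1 := ih (PySem.List.insertBy pairLt x acc)
    have h2 : (PySem.List.insertBy pairLt x acc ++ xs).Perm (acc ++ x :: xs) := by
      have := (insertBy_perm x acc).append_right xs
      exact this.trans (List.perm_middle.symm)
    exact (List.foldl_cons .. ▸ h1).trans h2

theorem sorted2_perm (xs : List (Int × Int)) :
    (PySem.List.sorted2 xs (fun p => p.1) (fun p => p.2) false).Perm xs := by
  rw [sorted2_eq_foldl]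
  simpa using foldl_insert_perm xs []

-- insertBy preserves 'pairwise not-greater'
theorem insertBy_pairwise (x : Int × Int) (ys : List (Int × Int))
    (h : ys.Pairwise (fun a b => ¬ lexlt b a)) :
    (PySem.List.insertBy pairLt x ys).Pairwise (fun a b => ¬ lexlt b a) := by
  induction ys with
  | nil => simp [PySem.List.insertBy, lexlt]
  | cons y ys ih =>
    rcases List.pairwise_cons.1 h with ⟨hy, hys⟩
    by_cases hp : pairLt x y = true
    · have hxy : lexlt x y := (pairLt_iff _ _).1 hp
      simp only [PySem.List.insertBy, hp, if_true]
      refine List.pairwise_cons.2 ⟨?_, h⟩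
      intro z hz
      rcases List.mem_cons.1 hz with rfl | hz'
      · exact fun h' => lexlt_asymm hxy h'
      · exact not_lexlt_trans (fun h' => lexlt_asymm hxy h') (hy z hz')
    · simp only [PySem.List.insertBy, hp]
      simp only [Bool.false_eq_true, if_false]
      refine List.pairwise_cons.2 ⟨?_, ih hys⟩
      intro z hz
      rcases (PySem.List.mem_insertBy pairLt x z ys).1 hz with rfl | hz'
      · exact fun h' => hp ((pairLt_iff _ _).2 h')
      · exact hy z hz'

theorem sorted2_pairwise (xs : List (Int × Int)) :
    (PySem.List.sorted2 xs (fun p => p.1) (fun p => p.2) false).Pairwise (fun a b => ¬ lexlt b a) := by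
  rw [sorted2_eq_foldl]
  have h : ∀ acc, acc.Pairwise (fun a b : Int × Int => ¬ lexlt b a) →
      (xs.foldl (fun acc x => PySem.List.insertBy pairLt x acc) acc).Pairwise (fun a b => ¬ lexlt b a) := by
    induction xs with
    | nil => intro acc h; simpa using h
    | cons x xs ih => intro acc h; exact ih _ (insertBy_pairwise x acc h)
  exact h [] (by simp)

-- snd-distinct + pairwise not-greater gives strict pairwise lexlt
theorem pairwise_lexlt_of_nodup (l : List (Int × Int))
    (hp : l.Pairwise (fun a b => ¬ lexlt b a)) (hn : (l.map Prod.snd).Nodup) :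
    l.Pairwise lexlt := by
  rw [List.nodup_iff_pairwise_ne, List.pairwise_map] at hn
  exact (hp.and hn).imp (fun h => lexlt_of_not_of_ne h.1 h.2)

-- both final sorts (by plate index) agree on permuted contents with distinct plate indices
theorem sorted_snd_eq_of_perm (xs ys : List (Int × Int))
    (hperm : ys.Perm xs) (hn : (xs.map Prod.snd).Nodup) :
    PySem.List.sorted ys (fun p => p.2) false = PySem.List.sorted xs (fun p => p.2) false := by
  apply PySem.List.sorted_eq_of_perm_of_pairwise_lt
  · exact (PySem.List.sorted_perm xs (fun p => p.2) false).trans hperm.symm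
  · have hle := PySem.List.sorted_pairwise xs (fun p => p.2)
    have hn' : ((PySem.List.sorted xs (fun p => p.2) false).map Prod.snd).Nodup :=
      ((PySem.List.sorted_perm xs (fun p => p.2) false).map Prod.snd).nodup_iff.2 hn
    rw [List.nodup_iff_pairwise_ne, List.pairwise_map] at hn'
    exact (hle.and hn').imp (fun h => lt_of_le_of_ne h.1 h.2)

theorem eq_of_perm_of_pairwise_lexlt {l₁ l₂ : List (Int × Int)}
    (hperm : l₁.Perm l₂) (h1 : l₁.Pairwise lexlt) (h2 : l₂.Pairwise lexlt) : l₁ = l₂ := by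
  exact hperm.eq_of_pairwise (fun a b _ _ hab hba => absurd hba (fun h => lexlt_asymm hab h)) h1 h2

theorem sorted2_eq_of_perm_of_pairwise (xs ys : List (Int × Int))
    (hperm : ys.Perm xs) (hys : ys.Pairwise lexlt) (hn : (xs.map Prod.snd).Nodup) :
    PySem.List.sorted2 xs (fun p => p.1) (fun p => p.2) false = ys := by
  have hp := sorted2_perm xs
  have hn' : ((PySem.List.sorted2 xs (fun p => p.1) (fun p => p.2) false).map Prod.snd).Nodup :=
    (hp.map Prod.snd).nodup_iff.2 hn
  exact eq_of_perm_of_pairwise_lexlt (hp.trans hperm.symm)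
    (pairwise_lexlt_of_nodup _ (sorted2_pairwise xs) hn') hys

-- A's heap loop equals the front-to-back consumption of the lex-sorted pair list
theorem go_eq (fuel : Nat) : ∀ (heap : List (Int × Int)) (n prev k : Int),
    heap.length = fuel → (heap.map Prod.snd).Nodup →
    goA fuel heap n prev k
      = goSorted (PySem.List.sorted2 heap (fun p => p.1) (fun p => p.2) false) n prev k := by
  induction fuel with
  | zero =>
    intro heap n prev k hl _
    rw [List.length_eq_zero_iff] at hl
    subst hl; rfl
  | succ fuel ih =>
    intro heap n prev k hl hn
    obtain ⟨x, xs, rfl⟩ : ∃ x xs, heap = x :: xs := by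
      cases heap with
      | nil => simp at hl
      | cons a l => exact ⟨a, l, rfl⟩
    have hsp := sorted2_perm (x :: xs)
    have hsn : ((PySem.List.sorted2 (x :: xs) (fun p => p.1) (fun p => p.2) false).map Prod.snd).Nodup :=
      (hsp.map Prod.snd).nodup_iff.2 hn
    have hspw := pairwise_lexlt_of_nodup _ (sorted2_pairwise (x :: xs)) hsn
    obtain ⟨m, t, hst⟩ : ∃ m t,
        PySem.List.sorted2 (x :: xs) (fun p => p.1) (fun p => p.2) false = m :: t := by
      cases hcs : PySem.List.sorted2 (x :: xs) (fun p => p.1) (fun p => p.2) false with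
      | nil => exfalso; have := hsp.length_eq; rw [hcs] at this; simp at this
      | cons a l => exact ⟨a, l, rfl⟩
    rw [hst] at hsp hspw
    have hms : m ∈ x :: xs := hsp.mem_iff.1 (List.mem_cons_self ..)
    have hpm : popMin x xs = m := by
      rcases popMin_spec x xs with ⟨hmem, hmin⟩
      have hmem' : popMin x xs ∈ m :: t := hsp.mem_iff.2 hmem
      rcases List.mem_cons.1 hmem' with h | h
      · exact h
      · exact absurd ((List.pairwise_cons.1 hspw).1 _ h) (hmin m hms)
    rw [hst]
    simp only [goA, goSorted, hpm]
    by_cases hbr : (m.1 - prev) * n ≤ k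
    · rw [if_pos hbr, if_neg (by omega)]
      have hperm_t : t.Perm ((x :: xs).erase m) :=
        (hsp.trans (List.perm_cons_erase hms)).cons_inv
      have hlen : ((x :: xs).erase m).length = fuel := by
        rw [List.length_erase_of_mem hms]; simpa using hl
      have hnod : (((x :: xs).erase m).map Prod.snd).Nodup :=
        ((List.erase_sublist ..).map Prod.snd).nodup hn
      rw [ih _ (n - 1) m.1 (k - (m.1 - prev) * n) hlen hnod,
          sorted2_eq_of_perm_of_pairwise _ _ hperm_t
            (List.pairwise_cons.1 hspw).2 hnod]
    · rw [if_neg hbr, if_pos (by omega)]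
      rw [sorted_snd_eq_of_perm (x :: xs) (m :: t) hsp hn]

-- the initial heap has distinct plate indices
theorem heap_snd_nodup (food_times : List Int) :
    (((PySem.List.enumerate food_times).map (fun p => (p.2, p.1 + 1))).map Prod.snd).Nodup := by
  rw [List.map_map, List.nodup_iff_pairwise_ne, List.pairwise_map]
  exact (PySem.List.pairwise_lt_enumerate food_times 0).imp (by intro a b h; simp; omega)

-- ===== arithmetic of eatenP and its pairwise version =====

-- eatenP over the pair list (fst components)
def eatenPairs (L : List (Int × Int)) (v : Int) : Int := (L.map (fun p => min p.1 v)).sum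

theorem eatenPairs_le (L : List (Int × Int)) (v c : Int) (h : ∀ p ∈ L, min p.1 v ≤ c) :
    eatenPairs L v ≤ c * L.length := by
  induction L with
  | nil => simp [eatenPairs]
  | cons x t ih =>
    have hx := h x (List.mem_cons_self ..)
    have ht := ih (fun p hp => h p (List.mem_cons_of_mem _ hp))
    simp only [eatenPairs, List.map_cons, List.sum_cons, List.length_cons] at *
    push_cast
    nlinarith

theorem le_eatenPairs (L : List (Int × Int)) (v c : Int) (h : ∀ p ∈ L, c ≤ min p.1 v) :
    c * L.length ≤ eatenPairs L v := by
  induction L with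
  | nil => simp [eatenPairs]
  | cons x t ih =>
    have hx := h x (List.mem_cons_self ..)
    have ht := ih (fun p hp => h p (List.mem_cons_of_mem _ hp))
    simp only [eatenPairs, List.map_cons, List.sum_cons, List.length_cons] at *
    push_cast
    nlinarith

theorem eatenPairs_eq_of_all_gt (L : List (Int × Int)) (v : Int) (h : ∀ p ∈ L, v < p.1) :
    eatenPairs L v = v * L.length := by
  induction L with
  | nil => simp [eatenPairs]
  | cons x t ih =>
    have hx := h x (List.mem_cons_self ..)
    have ht := ih (fun p hp => h p (List.mem_cons_of_mem _ hp))
    simp only [eatenPairs, List.map_cons, List.sum_cons, List.length_cons] at *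
    rw [min_eq_right (by omega)]
    push_cast
    linarith [ht]

-- ===== the core: goSorted computes the binary-search characterisation =====
theorem goSorted_spec (L : List (Int × Int)) : ∀ (prev k v : Int),
    L.Pairwise lexlt →
    eatenPairs L v - prev * L.length ≤ k →
    k < eatenPairs L (v + 1) - prev * L.length →
    goSorted L L.length prev k
      = (match PySem.List.pyGet?
            (PySem.List.sorted (L.filter fun p => decide (v < p.1)) (fun p => p.2) false)
            (k - (eatenPairs L v - prev * L.length)) with
         | some p => p.2
         | none => -1) := by
  intro prev k v hs h1 h2
  induction L generalizing prev k with
  | nil =>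
    simp only [eatenPairs, List.map_nil, List.sum_nil, List.length_nil] at h1 h2
    omega
  | cons x rest ih =>
    obtain ⟨f, o⟩ := x
    have hhead : ∀ p ∈ rest, f ≤ p.1 := by
      intro p hp
      rcases (List.pairwise_cons.1 hs).1 p hp with h | h
      · exact le_of_lt h
      · exact le_of_eq h.1
    have hlen : (((f, o) :: rest : List (Int × Int)).length : Int) = (rest.length : Int) + 1 := by
      simp
    have hn : (0 : Int) < (((f, o) :: rest : List (Int × Int)).length : Int) := by omega
    by_cases hvf : v < f
    · -- stop: every remaining plate is above v
      have hall : ∀ p ∈ (f, o) :: rest, v < p.1 := by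
        intro p hp
        rcases List.mem_cons.1 hp with rfl | hp'
        · exact hvf
        · exact lt_of_lt_of_le hvf (hhead p hp')
      have hEv := eatenPairs_eq_of_all_gt ((f, o) :: rest) v hall
      have hEv1 : eatenPairs ((f, o) :: rest) (v + 1) ≤ (v + 1) * ((f, o) :: rest).length :=
        eatenPairs_le _ _ _ (fun p _ => min_le_right _ _)
      have hstop : k < (f - prev) * (((f, o) :: rest : List (Int × Int)).length : Int) := by
        have hv1f : (v + 1) * (((f, o) :: rest : List (Int × Int)).length : Int)
            ≤ f * (((f, o) :: rest : List (Int × Int)).length : Int) :=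
          mul_le_mul_of_nonneg_right (by omega) (le_of_lt hn)
        nlinarith
      simp only [goSorted]
      rw [if_pos hstop]
      have hfilter : ((f, o) :: rest).filter (fun p => decide (v < p.1)) = (f, o) :: rest :=
        List.filter_eq_self.2 (fun p hp => by simpa using hall p hp)
      rw [hfilter]
      have hmod : PySem.Int.mod k (((f, o) :: rest : List (Int × Int)).length : Int)
          = k - (eatenPairs ((f, o) :: rest) v - prev * ((f, o) :: rest).length) := by
        rw [PySem.Int.mod_eq_emod_of_pos hn, hEv]
        set n : Int := (((f, o) :: rest : List (Int × Int)).length : Int) with hns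
        have hk : k = (k - (v * n - prev * n)) + n * (v - prev) := by ring
        have hr0 : 0 ≤ k - (v * n - prev * n) := by nlinarith [hEv, h1]
        have hrn : k - (v * n - prev * n) < n := by nlinarith [hEv1, h2]
        rw [hk, Int.add_mul_emod_self_left, Int.emod_eq_of_lt hr0 hrn]; ring
      rw [hmod]
    · -- recurse
      rw [not_lt] at hvf
      have hE : eatenPairs ((f, o) :: rest) v = f + eatenPairs rest v := by
        simp [eatenPairs, min_eq_left hvf]
      have hE1 : eatenPairs ((f, o) :: rest) (v + 1) = f + eatenPairs rest (v + 1) := by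
        simp [eatenPairs, min_eq_left (by omega : f ≤ v + 1)]
      have hnotstop : ¬ (k < (f - prev) * (((f, o) :: rest : List (Int × Int)).length : Int)) := by
        have hge : f * (((f, o) :: rest : List (Int × Int)).length : Int)
            ≤ eatenPairs ((f, o) :: rest) v := by
          apply le_eatenPairs
          intro p hp
          rcases List.mem_cons.1 hp with rfl | hp'
          · exact le_min (le_refl _) hvf
          · exact le_min (hhead p hp') hvf
        nlinarith
      simp only [goSorted]
      rw [if_neg hnotstop]
      set n : Int := (((f, o) :: rest : List (Int × Int)).length : Int) with hns
      have hcast : n - 1 = ((rest.length : Nat) : Int) := by omega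
      have hfn : f * n = f * ((rest.length : Nat) : Int) + f := by
        rw [show n = ((rest.length : Nat) : Int) + 1 by omega]; ring
      have ih' := ih f (k - (f - prev) * n) (List.pairwise_cons.1 hs).2
        (by linarith [hE, h1, hfn]) (by linarith [hE1, h2, hfn])
      rw [hcast, ih']
      have hfilter : ((f, o) :: rest).filter (fun p => decide (v < p.1))
          = rest.filter (fun p => decide (v < p.1)) :=
        List.filter_cons_of_neg (by simpa using hvf)
      have hidx : k - (f - prev) * n - (eatenPairs rest v - f * rest.length)
          = k - (eatenPairs ((f, o) :: rest) v - prev * ((f, o) :: rest).length) := by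
        rw [hE, ← hns]; linarith [hfn]
      rw [hfilter, hidx]


-- ===== binary search =====
theorem bsLoop_spec (fs : List Int) (k : Int) (fuel : Nat) : ∀ (lo hi : Int),
    lo < hi → eatenP fs lo ≤ k → k < eatenP fs hi → hi - lo ≤ (fuel : Int) + 1 →
    eatenP fs (bsLoop fs k fuel lo hi) ≤ k ∧ k < eatenP fs (bsLoop fs k fuel lo hi + 1) := by
  induction fuel with
  | zero =>
    intro lo hi hlh hlo hhi hf
    have he : hi = lo + 1 := by omega
    simp only [bsLoop]
    exact ⟨hlo, by rw [← he]; exact hhi⟩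
  | succ fuel ih =>
    intro lo hi hlh hlo hhi hf
    simp only [bsLoop]
    by_cases hgap : 1 < hi - lo
    · rw [if_pos hgap]
      have hfd : PySem.Int.floordiv (lo + hi) 2 = (lo + hi) / 2 :=
        PySem.Int.floordiv_eq_ediv_of_pos (by norm_num)
      have hb : lo + 1 ≤ PySem.Int.floordiv (lo + hi) 2 ∧ PySem.Int.floordiv (lo + hi) 2 ≤ hi - 1 := by
        rw [hfd]; omega
      by_cases hc : eatenP fs (PySem.Int.floordiv (lo + hi) 2) ≤ k
      · simp only [hc, if_pos]
        exact ih _ hi (by omega) hc hhi (by omega)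
      · rw [if_neg hc]
        exact ih lo _ (by omega) hlo (by omega) (by omega)
    · rw [if_neg hgap]
      have he : hi = lo + 1 := by omega
      exact ⟨hlo, by rw [← he]; exact hhi⟩

-- ===== the final scan =====
theorem findSurv_spec (v : Int) (l : List (Int × Int)) : ∀ (r : Int), 0 ≤ r →
    findSurv v l r
      = (match (l.filter fun q => decide (v < q.2))[r.toNat]? with
         | some q => q.1 + 1
         | none => -1) := by
  induction l with
  | nil => intro r _; simp [findSurv]
  | cons x rest ih =>
    intro r hr
    obtain ⟨i, f⟩ := x
    simp only [findSurv]
    by_cases hv : v < f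
    · rw [if_pos hv, List.filter_cons_of_pos (by simpa using hv)]
      by_cases hr0 : r = 0
      · subst hr0; simp
      · rw [if_neg hr0, ih (r - 1) (by omega)]
        have ht : r.toNat = (r - 1).toNat + 1 := by omega
        rw [ht, List.getElem?_cons_succ]
    · rw [if_neg hv, List.filter_cons_of_neg (by simpa using hv)]
      exact ih r hr


-- eatenP below the minimum / above the maximum
theorem eatenP_eq_of_all_gt (fs : List Int) (v : Int) (h : ∀ f ∈ fs, v < f) :
    eatenP fs v = v * fs.length := by
  induction fs with
  | nil => simp [eatenP]
  | cons a t ih =>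
    have ha := h a (List.mem_cons_self ..)
    have ht := ih (fun f hf => h f (List.mem_cons_of_mem _ hf))
    simp only [eatenP, List.map_cons, List.sum_cons, List.length_cons] at *
    rw [min_eq_right (by omega)]
    push_cast
    linarith

theorem eatenP_eq_sum_of_le (fs : List Int) (v : Int) (h : ∀ f ∈ fs, f ≤ v) :
    eatenP fs v = fs.sum := by
  induction fs with
  | nil => simp [eatenP]
  | cons a t ih =>
    have ha := h a (List.mem_cons_self ..)
    have ht := ih (fun f hf => h f (List.mem_cons_of_mem _ hf))
    simp only [eatenP, List.map_cons, List.sum_cons] at *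
    rw [min_eq_left ha, ht]

-- eatenPairs of the initial heap is eatenP of the plain list
theorem eatenPairs_heap (fs : List Int) (w : Int) : ∀ (s : Int),
    eatenPairs ((PySem.List.enumerate fs s).map (fun p => (p.2, p.1 + 1))) w = eatenP fs w := by
  induction fs with
  | nil => intro s; simp [eatenPairs, eatenP, PySem.List.enumerate_nil]
  | cons a t ih =>
    intro s
    simp only [PySem.List.enumerate_cons, List.map_cons, eatenPairs, eatenP,
      List.sum_cons] at *
    rw [ih (s + 1)]

-- ===== VERDICT (by name: the statement is the Claim_ definition above) =====
theorem solution_spec : Claim_equal_solution := by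
  intro fs k _
  unfold Spec_solution solution solution_alt
  by_cases hsum : fs.sum ≤ k
  · simp [hsum]
  · rw [if_neg hsum]
    by_cases hemp : fs = []
    · subst hemp
      simp [goA, PySem.List.enumerate_nil]
    · rw [if_neg (by simp [hemp, hsum])]
      obtain ⟨m, hm⟩ : ∃ m, PySem.List.min? (0 :: k :: fs) (fun x => x) = some m := by
        cases h : PySem.List.min? (0 :: k :: fs) (fun x => x) with
        | none => exact absurd ((PySem.List.min?_eq_none_iff _ _).1 h) (by simp)
        | some m => exact ⟨m, rfl⟩
      obtain ⟨M, hM⟩ : ∃ M, PySem.List.max? fs (fun x => x) = some M := by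
        cases h : PySem.List.max? fs (fun x => x) with
        | none => exact absurd ((PySem.List.max?_eq_none_iff _ _).1 h) hemp
        | some M => exact ⟨M, rfl⟩
      simp only [hm, hM]
      set heap := (PySem.List.enumerate fs).map (fun p => (p.2, p.1 + 1)) with hheap
      have hnodup : (heap.map Prod.snd).Nodup := heap_snd_nodup fs
      have hmmin : ∀ y ∈ 0 :: k :: fs, m ≤ y := PySem.List.min?_isMin hm
      have hMmax : ∀ y ∈ fs, y ≤ M := PySem.List.max?_isMax hM
      obtain ⟨a, ha⟩ : ∃ a, a ∈ fs := List.exists_mem_of_ne_nil fs hemp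
      have hm0 : m ≤ 0 := hmmin 0 (by simp)
      have hmk : m ≤ k := hmmin k (by simp)
      have hmf : ∀ f ∈ fs, m ≤ f := fun f hf => hmmin f (by simp [hf])
      have hlen1 : 1 ≤ (fs.length : Int) := by
        have : 0 < fs.length := List.length_pos_of_ne_nil hemp
        omega
      have hlo : eatenP fs (m - 1) ≤ k := by
        rw [eatenP_eq_of_all_gt fs (m - 1) (fun f hf => by have := hmf f hf; omega)]
        nlinarith
      have hhi : k < eatenP fs M := by
        rw [eatenP_eq_sum_of_le fs M hMmax]; omega
      have hlohi : m - 1 < M := by have := hmf a ha; have := hMmax a ha; omega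
      set v := bsLoop fs k (M - (m - 1)).toNat (m - 1) M with hv
      obtain ⟨hv1, hv2⟩ := bsLoop_spec fs k (M - (m - 1)).toNat (m - 1) M hlohi hlo hhi (by omega)
      rw [← hv] at hv1 hv2
      rw [go_eq heap.length heap (PySem.List.len fs) 0 k rfl hnodup]
      have hlfs : PySem.List.len fs
          = ((PySem.List.sorted2 heap (fun p => p.1) (fun p => p.2) false).length : Int) := by
        rw [PySem.List.len_eq, (sorted2_perm heap).length_eq]
        simp [hheap]
      rw [hlfs]
      set L := PySem.List.sorted2 heap (fun p => p.1) (fun p => p.2) false with hL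
      have hLnodup : (L.map Prod.snd).Nodup := ((sorted2_perm heap).map Prod.snd).nodup_iff.2 hnodup
      have hEL : ∀ w, eatenPairs L w = eatenPairs heap w := fun w => by
        unfold eatenPairs
        exact ((sorted2_perm heap).map _).sum_eq
      have hEheap : ∀ w, eatenPairs heap w = eatenP fs w := fun w => eatenPairs_heap fs w 0
      rw [goSorted_spec L 0 k v (pairwise_lexlt_of_nodup L (sorted2_pairwise heap) hLnodup)
          (by rw [hEL, hEheap]; simpa using hv1)
          (by rw [hEL, hEheap]; simpa using hv2)]
      have hfilters : PySem.List.sorted (L.filter fun p => decide (v < p.1)) (fun p => p.2) false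
          = ((PySem.List.enumerate fs).filter fun q => decide (v < q.2)).map (fun q => (q.2, q.1 + 1)) := by
        have hpermf : (L.filter fun p => decide (v < p.1)).Perm (heap.filter fun p => decide (v < p.1)) :=
          (sorted2_perm heap).filter _
        have hnf : ((heap.filter fun p => decide (v < p.1)).map Prod.snd).Nodup :=
          (List.filter_sublist.map Prod.snd).nodup hnodup
        rw [sorted_snd_eq_of_perm _ _ hpermf hnf]
        have hfm : heap.filter (fun p => decide (v < p.1))
            = ((PySem.List.enumerate fs).filter fun q => decide (v < q.2)).map (fun q => (q.2, q.1 + 1)) := by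
          rw [hheap, List.filter_map]
          rfl
        rw [hfm]
        refine PySem.List.sorted_eq_of_perm_of_pairwise_lt _ _ _ (List.Perm.refl _) ?_
        rw [List.pairwise_map]
        exact ((PySem.List.pairwise_lt_enumerate fs 0).filter _).imp (fun h => by simpa using h)
      rw [hfilters]
      have hidx : k - (eatenPairs L v - 0 * (L.length : Int)) = k - eatenP fs v := by
        rw [hEL, hEheap]; ring
      rw [hidx]
      have hr : 0 ≤ k - eatenP fs v := by omega
      rw [findSurv_spec v (PySem.List.enumerate fs) _ hr]
      rw [PySem.List.pyGet?_of_nonneg _ hr, List.getElem?_map]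
      cases ((PySem.List.enumerate fs).filter fun q => decide (v < q.2))[(k - eatenP fs v).toNat]? with
      | none => rfl
      | some q => rfl
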